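-- pv_equiv track=rewrite | github.com/matrxi999/Program_analysis_brainfuck | GTPtranspilerOptimiez.py | optimize_increments
-- ===== SOURCE A (Python) =====
-- def optimize_increments(sourcecode):
--     """Combine consecutive + and - operations."""
--     new_code = []
--     count = 0
--
--     for char in sourcecode:
--         if char in ['+', '-']:
--             count = count + 1 if char == '+' else count - 1
--         else:
--             if count:
--                 new_code.append(('+'*abs(count) if count > 0 else '-'*abs(count)))
--                 count = 0
--             new_code.append(char)
--
--     if count:  # Append any remaining counts
--         new_code.append(('+'*abs(count) if count > 0 else '-'*abs(count)))
--
--     return ''.join(new_code)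
-- ===== SOURCE B (Python) =====
-- def optimize_increments(sourcecode):
--     """Combine consecutive + and - operations (span-scan re-implementation)."""
--     out = []
--     i = 0
--     n = len(sourcecode)
--     while i < n:
--         if sourcecode[i] in '+-':
--             j = i
--             net = 0
--             while j < n and sourcecode[j] in '+-':
--                 net += 1 if sourcecode[j] == '+' else -1
--                 j += 1
--             if net > 0:
--                 out.append('+' * net)
--             elif net < 0:
--                 out.append('-' * (-net))
--             i = j
--         else:
--             out.append(sourcecode[i])
--             i += 1
--     return ''.join(out)
-- ===== Notes on version B (the rewrite author's own statement) =====
-- stated objective: alternative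
-- what changed: Replaces A's single pass with a running accumulator and a trailing flush branch by a two-pointer span scan: each maximal run of increment/decrement characters is located with an inner scan that computes its net and emits it at once, other characters are copied, so no accumulator state or flush survives across outer iterations.
import Mathlib
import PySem

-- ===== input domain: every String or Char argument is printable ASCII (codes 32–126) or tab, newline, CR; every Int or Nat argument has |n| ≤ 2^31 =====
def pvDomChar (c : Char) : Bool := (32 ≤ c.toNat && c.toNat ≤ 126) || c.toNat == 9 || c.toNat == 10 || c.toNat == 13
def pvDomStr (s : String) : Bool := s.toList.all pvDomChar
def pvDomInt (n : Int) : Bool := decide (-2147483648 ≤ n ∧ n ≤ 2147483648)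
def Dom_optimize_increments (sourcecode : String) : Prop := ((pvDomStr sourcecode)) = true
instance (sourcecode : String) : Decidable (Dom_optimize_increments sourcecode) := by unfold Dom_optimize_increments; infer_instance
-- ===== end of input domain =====

-- B replaces A's running accumulator + trailing flush by a span scan over maximal '+'/'-' runs; objective: alternative decomposition, same O(n) cost.

-- ===== PORT A =====
-- '+'*abs(count) / '-'*abs(count)
def pvRenderA (count : Int) : String :=
  if 0 < count then String.ofList (List.replicate count.natAbs '+')
  else String.ofList (List.replicate count.natAbs '-')

-- one iteration of A's `for char in sourcecode` loop; state = (new_code, count)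
def pvStepA (st : List String × Int) (char : Char) : List String × Int :=
  if char = '+' ∨ char = '-' then
    (st.1, if char = '+' then st.2 + 1 else st.2 - 1)
  else
    let nc := if st.2 ≠ 0 then st.1 ++ [pvRenderA st.2] else st.1
    (nc ++ [String.ofList [char]], 0)

def optimize_increments (sourcecode : String) : String :=
  let r := sourcecode.toList.foldl pvStepA ([], 0)
  let nc := if r.2 ≠ 0 then r.1 ++ [pvRenderA r.2] else r.1
  PySem.Str.join "" nc

-- ===== PORT B =====
-- `if net > 0: '+'*net elif net < 0: '-'*(-net) else nothing`
def pvRenderB (net : Int) : List Char :=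
  if 0 < net then List.replicate net.toNat '+'
  else if net < 0 then List.replicate (-net).toNat '-'
  else []

def pvIsInc (c : Char) : Bool := c = '+' || c = '-'

-- net of one maximal run, as B's inner while accumulates it
def pvNet (run : List Char) : Int :=
  run.foldl (fun n c => n + (if c = '+' then 1 else -1)) 0

-- B's outer while: at a '+'/'-' scan the whole run (take/drop the span), else copy the char
def pvGoB : List Char → List Char
  | [] => []
  | c :: t =>
    if pvIsInc c then
      pvRenderB (pvNet (c :: t.takeWhile pvIsInc)) ++ pvGoB (t.dropWhile pvIsInc)
    else
      c :: pvGoB t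
termination_by l => l.length
decreasing_by
  · exact Nat.lt_succ_of_le (List.length_dropWhile_le pvIsInc t)
  · simp

def optimize_increments_alt (sourcecode : String) : String :=
  String.ofList (pvGoB sourcecode.toList)

-- ===== PRECONDITION & SPEC =====
def Spec_optimize_increments (sourcecode : String) (out : String) : Prop := out = optimize_increments_alt sourcecode
instance (sourcecode : String) (out : String) : Decidable (Spec_optimize_increments sourcecode out) := by unfold Spec_optimize_increments; infer_instance

-- ===== CLAIM (what is proved, stated in full; the proofs are below) =====
def Claim_equal_optimize_increments : Prop := ∀ (sourcecode : String), Dom_optimize_increments sourcecode → Spec_optimize_increments sourcecode (optimize_increments sourcecode)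

-- ===== LEMMAS AND PROOFS =====

-- the char-level result of A's loop: pending count, then the rest of the input
def pvRest (count : Int) : List Char → List Char
  | [] => if count ≠ 0 then (pvRenderA count).toList else []
  | c :: t =>
    if pvIsInc c then pvRest (if c = '+' then count + 1 else count - 1) t
    else (if count ≠ 0 then (pvRenderA count).toList else []) ++ c :: pvRest 0 t

theorem pv_join_cons (a : List Char) (r : List (List Char)) :
    PySem.Chars.join [] (a :: r) = a ++ PySem.Chars.join [] r := by
  cases r <;> simp [PySem.Chars.join, List.intercalate]

theorem pv_join_snoc (r : List (List Char)) (a : List Char) :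
    PySem.Chars.join [] (r ++ [a]) = PySem.Chars.join [] r ++ a := by
  induction r with
  | nil => simp [PySem.Chars.join, List.intercalate]
  | cons b u ih => rw [List.cons_append, pv_join_cons, pv_join_cons, ih, List.append_assoc]

-- A's loop, then flush-and-join, described character-wise
theorem pvA_loop (l : List Char) (acc : List String) (count : Int) :
    (let r := l.foldl pvStepA (acc, count)
     PySem.Chars.join [] ((if r.2 ≠ 0 then r.1 ++ [pvRenderA r.2] else r.1).map String.toList))
    = PySem.Chars.join [] (acc.map String.toList) ++ pvRest count l := by
  induction l generalizing acc count with
  | nil =>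
      simp only [List.foldl_nil, pvRest]
      split
      · simp [List.map_append, pv_join_snoc]
      · simp
  | cons c t ih =>
      simp only [List.foldl_cons]
      by_cases hc : c = '+' ∨ c = '-'
      · have hinc : pvIsInc c = true := by
          unfold pvIsInc; rcases hc with h | h <;> simp [h]
        simp only [pvStepA, if_pos hc, pvRest, hinc, if_pos]
        exact ih acc _
      · have hinc : pvIsInc c = false := by
          unfold pvIsInc
          simp only [Bool.or_eq_false_iff, decide_eq_false_iff_not]
          exact ⟨fun h => hc (Or.inl h), fun h => hc (Or.inr h)⟩
        simp only [pvStepA, if_neg hc, pvRest, hinc, Bool.false_eq_true, if_false]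
        rw [ih]
        split
        · simp only [List.map_append, List.map_cons, List.map_nil, String.toList_ofList,
            ← List.append_assoc, pv_join_snoc]
          simp
        · simp [List.map_append, pv_join_snoc]

theorem pv_renderA_toList (n : Int) (h : n ≠ 0) : (pvRenderA n).toList = pvRenderB n := by
  unfold pvRenderA pvRenderB
  by_cases hp : 0 < n
  · simp only [hp, if_pos]
    simp only [String.toList_ofList]
    congr 1
    omega
  · have hn : n < 0 := by omega
    rw [if_neg hp, if_neg hp, if_pos hn]
    simp only [String.toList_ofList]
    congr 1
    omega

theorem pv_renderZ (n : Int) : (if n ≠ 0 then (pvRenderA n).toList else []) = pvRenderB n := by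
  split
  · exact pv_renderA_toList n (by assumption)
  · simp at *; subst ‹n = 0›; simp [pvRenderB]

theorem pv_net_cons (c : Char) (t : List Char) :
    pvNet (c :: t) = (if c = '+' then 1 else -1) + pvNet t := by
  unfold pvNet
  rw [List.foldl_cons]
  have : ∀ (l : List Char) (a : Int),
      l.foldl (fun n c => n + (if c = '+' then 1 else -1)) a
      = a + l.foldl (fun n c => n + (if c = '+' then 1 else -1)) 0 := by
    intro l
    induction l with
    | nil => simp
    | cons d u ih => intro a; rw [List.foldl_cons, List.foldl_cons, ih, ih (0 + _)]; ring
  rw [this]; simp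

-- B absorbs a leading (possibly empty) run: this is pvGoB's own shape
theorem pvGoB_run (t : List Char) :
    pvGoB t = pvRenderB (pvNet (t.takeWhile pvIsInc)) ++ pvGoB (t.dropWhile pvIsInc) := by
  cases t with
  | nil => simp [pvGoB, pvNet, pvRenderB]
  | cons c u =>
      by_cases hc : pvIsInc c = true
      · rw [pvGoB]
        simp [hc]
      · simp only [Bool.not_eq_true] at hc
        simp [hc, pvNet, pvRenderB]

theorem pvRest_goB (l : List Char) (count : Int) :
    pvRest count l = pvRenderB (count + pvNet (l.takeWhile pvIsInc)) ++ pvGoB (l.dropWhile pvIsInc) := by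
  induction l generalizing count with
  | nil =>
      rw [show pvRest count [] = (if count ≠ 0 then (pvRenderA count).toList else []) from rfl,
        pv_renderZ]
      simp [pvGoB, pvNet]
  | cons c t ih =>
      by_cases hc : pvIsInc c = true
      · have hsum : count + pvNet (c :: t.takeWhile pvIsInc)
            = (if c = '+' then count + 1 else count - 1) + pvNet (t.takeWhile pvIsInc) := by
          rw [pv_net_cons]; split <;> ring
        simp only [pvRest, hc, if_pos, List.takeWhile_cons, List.dropWhile_cons, hsum]
        exact ih _
      · simp only [Bool.not_eq_true] at hc
        simp only [pvRest, hc, List.takeWhile_cons, List.dropWhile_cons, Bool.false_eq_true,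
          if_false]
        rw [pv_renderZ, ih 0]
        simp only [zero_add]
        rw [← pvGoB_run]
        have h2 : pvGoB (c :: t) = c :: pvGoB t := by rw [pvGoB]; simp [hc]
        rw [h2]
        simp [pvNet]

-- ===== VERDICT (by name: the statement is the Claim_ definition above) =====
theorem optimize_increments_spec : Claim_equal_optimize_increments := by
  intro s _
  unfold Spec_optimize_increments optimize_increments optimize_increments_alt
  apply String.toList_inj.mp
  rw [PySem.Str.toList_join]
  have h1 := pvA_loop s.toList [] 0
  simp only [] at h1
  rw [show ("" : String).toList = [] from rfl]
  rw [h1]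
  simp only [List.map_nil]
  rw [show PySem.Chars.join [] [] = [] from rfl, List.nil_append]
  rw [pvRest_goB]
  simp only [zero_add]
  rw [← pvGoB_run]
  simp
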